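-- pv_equiv track=rewrite | github.com/rodrigorahal/advent-of-code-2024 | 25/main.py | lock_to_heights
-- ===== SOURCE A (Python) =====
-- def lock_to_heights(lock):
--     heights = []
--     H, W = len(lock), len(lock[0])
--     for col in range(W):
--         h = 0
--         for row in range(H):
--             if lock[row][col] == ".":
--                 heights.append(h - 1)
--                 break
--             h += 1
--     return heights
-- ===== SOURCE B (Python) =====
-- def lock_to_heights(lock):
--     H, W = len(lock), len(lock[0])
--     res = [None] * W
--     for row in range(H):
--         for col in range(W):
--             if res[col] is None and lock[row][col] == ".":
--                 res[col] = row - 1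
--     return [v for v in res if v is not None]
-- ===== Notes on version B (the rewrite author's own statement) =====
-- stated objective: alternative
-- what changed: Replaces the column-major scan with early break by a single row-major sweep maintaining a per-column Option state (first dot row - 1), filtered at the end; columns without a dot are naturally dropped.
import Mathlib
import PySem

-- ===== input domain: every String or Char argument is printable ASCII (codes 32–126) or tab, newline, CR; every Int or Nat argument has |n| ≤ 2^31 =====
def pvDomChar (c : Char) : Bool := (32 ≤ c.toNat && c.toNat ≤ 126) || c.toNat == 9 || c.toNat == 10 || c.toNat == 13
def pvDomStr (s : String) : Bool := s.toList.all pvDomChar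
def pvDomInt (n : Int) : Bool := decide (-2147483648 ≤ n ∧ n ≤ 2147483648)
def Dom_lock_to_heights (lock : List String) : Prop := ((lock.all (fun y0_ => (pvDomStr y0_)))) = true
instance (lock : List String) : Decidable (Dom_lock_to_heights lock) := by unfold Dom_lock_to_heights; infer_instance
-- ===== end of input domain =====

-- B replaces A's column-major scan (early break per column) by one row-major sweep over a
-- per-column Option state, filtered at the end; same cost, different traversal (objective: alternative).

-- ===== PORT A =====
-- inner 'for row in range(H)' loop of A for one column: h counts rows until the first '.'
def pvInnerA (rows : List String) (col : Int) (h : Int) : Option Int :=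
  match rows with
  | [] => none
  | s :: rest =>
    match PySem.Str.pyGet? s col with
    | none => none  -- IndexError on ragged input; excluded by Pre_
    | some c => if c = '.' then some (h - 1) else pvInnerA rest col (h + 1)

def lock_to_heights (lock : List String) : List Int :=
  match lock with
  | [] => []  -- len(lock[0]) raises IndexError on []; excluded by Pre_
  | s0 :: _ =>
    (PySem.List.pyRange 0 (PySem.Str.len s0) 1).foldl
      (fun acc col =>
        match pvInnerA lock col 0 with
        | some v => acc ++ [v]
        | none => acc) []

-- ===== PORT B =====
-- one row of B's sweep: update every still-None column that sees a '.'
def pvRowStep (s : String) (r : Int) (res : List (Option Int)) : List (Option Int) :=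
  res.zipIdx.map (fun p =>
    match p.1 with
    | some v => some v
    | none => if PySem.Str.pyGet? s (p.2 : Int) = some '.' then some (r - 1) else none)

def lock_to_heights_alt (lock : List String) : List Int :=
  match lock with
  | [] => []  -- len(lock[0]) raises IndexError on []; excluded by Pre_
  | s0 :: _ =>
    let final := (PySem.List.enumerate lock 0).foldl
      (fun res p => pvRowStep p.2 p.1 res)
      (List.replicate s0.toList.length (none : Option Int))
    final.filterMap id

-- ===== PRECONDITION & SPEC =====
-- Pre_ is exactly where A returns: the grid is nonempty and, in every column of width
-- W = len(lock[0]), any row too short for that column comes after a row with a '.' in it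
-- (otherwise lock[row][col] raises IndexError).
def Pre_lock_to_heights (lock : List String) : Prop :=
  lock ≠ [] ∧
  ∀ col < (lock.headD "").toList.length, ∀ r < lock.length,
    (lock.getD r "").toList.length ≤ col →
      ∃ r' < r, ((lock.getD r' "").toList)[col]? = some '.'
instance (lock : List String) : Decidable (Pre_lock_to_heights lock) := by
  unfold Pre_lock_to_heights; infer_instance
def pvWitness_lock_to_heights : List String := ["#.", "..", "#."]

def Spec_lock_to_heights (lock : List String) (out : List Int) : Prop := out = lock_to_heights_alt lock
instance (lock : List String) (out : List Int) : Decidable (Spec_lock_to_heights lock out) := by unfold Spec_lock_to_heights; infer_instance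

-- ===== CLAIM (what is proved, stated in full; the proofs are below) =====
def Claim_equal_lock_to_heights : Prop := ∀ (lock : List String), Dom_lock_to_heights lock → Pre_lock_to_heights lock → Spec_lock_to_heights lock (lock_to_heights lock)

-- ===== LEMMAS AND PROOFS =====

-- A's append-on-some fold is a filterMap
theorem pv_foldl_append_opt (g : Int → Option Int) (l : List Int) (acc : List Int) :
    l.foldl (fun acc col =>
      match g col with
      | some v => acc ++ [v]
      | none => acc) acc = acc ++ l.filterMap g := by
  induction l generalizing acc with
  | nil => simp
  | cons x xs ih =>
    simp only [List.foldl_cons, List.filterMap_cons]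
    cases hg : g x <;> simp [ih]

-- per-column step of B's sweep
def pvColStep (col : Nat) (v : Option Int) (p : Int × String) : Option Int :=
  match v with
  | some w => some w
  | none => if PySem.Str.pyGet? p.2 (col : Int) = some '.' then some (p.1 - 1) else none

theorem pv_colStep_absorb (col : Nat) (w : Int) (l : List (Int × String)) :
    l.foldl (pvColStep col) (some w) = some w := by
  induction l with
  | nil => rfl
  | cons p ps ih => simpa [pvColStep] using ih

theorem pv_rowStep_length (s : String) (r : Int) (res : List (Option Int)) :
    (pvRowStep s r res).length = res.length := by
  simp [pvRowStep]

theorem pv_rowStep_get (s : String) (r : Int) (res : List (Option Int)) (col : Nat)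
    (h : col < res.length) :
    (pvRowStep s r res)[col]'(by simpa [pv_rowStep_length] using h) =
      pvColStep col res[col] (r, s) := by
  simp [pvRowStep, pvColStep]

theorem pv_fold_length (rows : List (Int × String)) (res : List (Option Int)) :
    (rows.foldl (fun res p => pvRowStep p.2 p.1 res) res).length = res.length := by
  induction rows generalizing res with
  | nil => rfl
  | cons p ps ih => simpa [pv_rowStep_length] using ih (pvRowStep p.2 p.1 res)

theorem pv_fold_get (rows : List (Int × String)) (res : List (Option Int)) (col : Nat)
    (h : col < res.length) :
    (rows.foldl (fun res p => pvRowStep p.2 p.1 res) res)[col]'(by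
        simpa [pv_fold_length] using h) =
      rows.foldl (pvColStep col) res[col] := by
  induction rows generalizing res with
  | nil => rfl
  | cons p ps ih =>
    have h' : col < (pvRowStep p.2 p.1 res).length := by simpa [pv_rowStep_length] using h
    simpa [pv_rowStep_get p.2 p.1 res col h] using ih (pvRowStep p.2 p.1 res) h'

-- B's per-column fold computes A's inner loop, for any starting row index, given that in
-- this column any row too short comes after a dot row
theorem pv_col_eq_inner (rows : List String) (col : Nat) (r0 : Int)
    (hok : ∀ r < rows.length, (rows.getD r "").toList.length ≤ col →
        ∃ r' < r, ((rows.getD r' "").toList)[col]? = some '.') :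
    (PySem.List.enumerate rows r0).foldl (pvColStep col) none =
      pvInnerA rows (col : Int) r0 := by
  induction rows generalizing r0 with
  | nil => rfl
  | cons s rest ih =>
    rw [PySem.List.enumerate_cons]
    simp only [List.foldl_cons]
    cases hg : s.toList[col]? with
    | none =>
      exfalso
      obtain ⟨r', hr', -⟩ := hok 0 (by simp) (by
        simpa using List.getElem?_eq_none_iff.mp hg)
      omega
    | some c =>
      by_cases hdot : c = '.'
      · have h1 : pvColStep col none (r0, s) = some (r0 - 1) := by
          simp [pvColStep, hg, hdot]
        rw [h1, pv_colStep_absorb]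
        simp [pvInnerA, hg, hdot]
      · have hok' : ∀ r < rest.length, (rest.getD r "").toList.length ≤ col →
            ∃ r' < r, ((rest.getD r' "").toList)[col]? = some '.' := by
          intro r hr hshort
          obtain ⟨r', hr', hd⟩ := hok (r + 1) (by simpa using Nat.succ_lt_succ hr)
            (by simpa using hshort)
          match r', hr', hd with
          | 0, _, hd => exact absurd (by simpa [hg] using hd) hdot
          | (k + 1), hk, hd => exact ⟨k, by omega, by simpa using hd⟩
        have h1 : pvColStep col none (r0, s) = none := by
          simp [pvColStep, hg, hdot]
        rw [h1, ih (r0 + 1) hok']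
        simp [pvInnerA, hg, hdot]

-- ===== VERDICT (by name: the statement is the Claim_ definition above) =====
theorem lock_to_heights_spec : Claim_equal_lock_to_heights := by
  intro lock _ hpre
  obtain ⟨hne, hok⟩ := hpre
  unfold Spec_lock_to_heights
  match lock, hne with
  | s0 :: rest, _ =>
    simp only [lock_to_heights, lock_to_heights_alt]
    set L := s0 :: rest with hL
    set W := s0.toList.length with hW
    have hok' : ∀ col < W, ∀ r < L.length, (L.getD r "").toList.length ≤ col →
        ∃ r' < r, ((L.getD r' "").toList)[col]? = some '.' := by
      intro col hcol
      exact hok col (by simpa [hL] using hcol)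
    -- B's final state, elementwise
    have hlenfin : ((PySem.List.enumerate L 0).foldl
        (fun res p => pvRowStep p.2 p.1 res) (List.replicate W none)).length = W := by
      simp [pv_fold_length]
    have hfin : ∀ (col : Nat) (h : col < W),
        ((PySem.List.enumerate L 0).foldl (fun res p => pvRowStep p.2 p.1 res)
          (List.replicate W none))[col]'(by omega) =
        pvInnerA L (Int.ofNat col) 0 := by
      intro col h
      have := pv_fold_get (PySem.List.enumerate L 0) (List.replicate W none) col
        (by simpa using h)
      rw [this]
      have hrep : (List.replicate W (none : Option Int))[col]'(by simpa using h) = none := by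
        simp
      rw [hrep]
      exact pv_col_eq_inner L col 0 (hok' col h)
    have hfin_eq : (PySem.List.enumerate L 0).foldl (fun res p => pvRowStep p.2 p.1 res)
        (List.replicate W none) =
        (List.range W).map (fun (col : Nat) => pvInnerA L (Int.ofNat col) 0) := by
      apply List.ext_getElem
      · simp [hlenfin]
      · intro i h1 h2
        have hiW : i < W := by simpa [hlenfin] using h1
        simpa using hfin i hiW
    rw [hfin_eq, List.filterMap_map]
    -- A side
    have hWlen : PySem.Str.len s0 = (W : Int) := by simp [PySem.Str.len_eq, hW]
    rw [hWlen, PySem.List.pyRange_zero_natCast,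
      pv_foldl_append_opt (fun col => pvInnerA L col 0), List.filterMap_map]
    rfl
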